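-- pv_equiv track=rewrite | github.com/DarkSyed/comp110-22f-workspace | exercises/ex06/dictionary.py | count
-- ===== SOURCE A (Python) =====
-- def count(list_1: list[str]) -> dict[str, int]:
--     """Count function."""
--     count_dict: dict[str, int] = {}  # Changed variable name for consistency
--
--     for value in list_1:
--         if value in count_dict:
--             count_dict[value] += 1
--         else:
--             count_dict[value] = 1
--
--     return count_dict
-- ===== SOURCE B (Python) =====
-- def count(list_1: list[str]) -> dict[str, int]:
--     """Count function: one dedup pass for the keys, then list.count per distinct key."""
--     return {v: list_1.count(v) for v in dict.fromkeys(list_1)}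
-- ===== Notes on version B (the rewrite author's own statement) =====
-- stated objective: idiomatic
-- what changed: Replaces the running-counter loop over a dict by a dict comprehension over the first-seen distinct keys (dict.fromkeys) with list.count per key.
import Mathlib
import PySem

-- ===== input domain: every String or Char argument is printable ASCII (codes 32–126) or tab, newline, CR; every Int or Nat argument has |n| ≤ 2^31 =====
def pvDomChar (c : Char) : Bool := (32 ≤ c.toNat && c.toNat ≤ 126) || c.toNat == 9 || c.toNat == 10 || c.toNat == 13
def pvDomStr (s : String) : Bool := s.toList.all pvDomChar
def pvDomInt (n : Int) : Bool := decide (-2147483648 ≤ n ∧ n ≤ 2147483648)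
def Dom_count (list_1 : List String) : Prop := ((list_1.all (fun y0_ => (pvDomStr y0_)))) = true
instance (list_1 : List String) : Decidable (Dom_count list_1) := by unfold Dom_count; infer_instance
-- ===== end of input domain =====

-- B rewrites the running-counter loop as a dict comprehension over first-seen distinct keys with list.count per key (idiomatic, not faster).
-- ===== PORT A =====
-- Literal port of A: fold the dict-building loop, return the dict's items.
def count (list_1 : List String) : List (String × Int) :=
  (list_1.foldl
    (fun (d : PySem.Dict String Int) (value : String) =>
      if d.contains value then d.modify value 0 (· + 1) else d.insert value 1)
    PySem.Dict.empty).items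

-- ===== PORT B =====
-- Port of B: distinct keys in first-seen order, each paired with its count.
def count_alt (list_1 : List String) : List (String × Int) :=
  (PySem.List.dedup list_1).map (fun v => (v, (PySem.List.count list_1 v : Int)))

-- ===== PRECONDITION & SPEC =====
def Spec_count (list_1 : List String) (out : List (String × Int)) : Prop := out = count_alt list_1
instance (list_1 : List String) (out : List (String × Int)) : Decidable (Spec_count list_1 out) := by unfold Spec_count; infer_instance

-- ===== CLAIM (what is proved, stated in full; the proofs are below) =====
def Claim_equal_count : Prop := ∀ (list_1 : List String), Dom_count list_1 → Spec_count list_1 (count list_1)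

-- ===== LEMMAS AND PROOFS =====

-- A's loop body coincides with the Counter step: when the key is absent, modify with default 0 inserts 1.
theorem count_step_eq (d : PySem.Dict String Int) (v : String) :
    (if d.contains v then d.modify v 0 (· + 1) else d.insert v 1) = d.modify v 0 (· + 1) := by
  by_cases h : d.contains v = true
  · simp [h]
  · simp only [Bool.not_eq_true] at h
    simp only [h, if_neg Bool.false_ne_true, PySem.Dict.modify, PySem.Dict.getD,
      (PySem.Dict.get?_eq_none_iff_contains d v).mpr h, Option.getD_none, zero_add]

-- ===== VERDICT (by name: the statement is the Claim_ definition above) =====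
theorem count_spec : Claim_equal_count := by
  intro list_1 _
  show count list_1 = count_alt list_1
  unfold count count_alt
  have h : list_1.foldl
      (fun (d : PySem.Dict String Int) (value : String) =>
        if d.contains value then d.modify value 0 (· + 1) else d.insert value 1)
      PySem.Dict.empty = PySem.Dict.counter list_1 := by
    rw [PySem.Dict.counter_eq_foldl]
    exact PySem.List.foldl_congr_mem _ _ _ _ (fun d v _ => count_step_eq d v)
  rw [h, PySem.Dict.items_counter]
  simp [PySem.List.dedup_eq_ofList, PySem.List.count_eq]
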